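-- pv_equiv track=rewrite | github.com/gudonghee2000/Algorithm-python | BaekJoon/삼성 기출문제/21608-실패.py | bfs
-- ===== SOURCE A (Python) =====
-- def second_condi(table, j, t, friend):
--     dx = [0, 0, 1, -1]
--     dy = [-1, 1, 0, 0]
--     cnt = 0
--     for i in range(4):
--         nx = j + dx[i]
--         ny = t + dy[i]
--         if nx < 0 or ny < 0 or nx >= len(table) or ny >= len(table):
--             continue
--         if table[nx][ny] == -1:
--             cnt += 1
--     return cnt
--
-- def first_condi(table, j, t, friend):
--     dx = [0, 0, 1, -1]
--     dy = [-1, 1, 0, 0]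
--     cnt = 0
--     for i in range(4):
--         nx = j + dx[i]
--         ny = t + dy[i]
--         if nx < 0 or ny < 0 or nx >= len(table) or ny >= len(table):
--             continue
--         if table[nx][ny] in friend:
--             cnt += 1
--     return cnt
--
-- def bfs(table, i):
--     start = i[0]
--     friend = list(i[1:len(i)])
--     first = 0
--     second = 0
--     r = []
--     c = []
--     blank = []
--     for j in range(len(table)):
--         for t in range(len(table)):
--             if table[j][t] == -1:
--                 first_cnt = first_condi(table, j, t, friend)
--                 if first_cnt != 0 and first < first_cnt:
--                     first = first_cnt
--     for j in range(len(table)):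
--         for t in range(len(table)):
--             if table[j][t] == -1:
--                 first_cnt = first_condi(table, j, t, friend)
--                 if first_cnt != 0 and first == first_cnt:
--                     r.append(j)
--                     c.append(t)
--     if len(r) == 1 and len(c) == 1:
--         return [r[0], c[0]]
--     if r == [] and c == []:
--         new_r, new_c = 0, 0
--         for j in range(len(table)):
--             for t in range(len(table)):
--                 if table[j][t] == -1:
--                     second_cnt = second_condi(table, j, t, friend)
--                     if second_cnt != 0 and second < second_cnt:
--                         new_r = j
--                         new_c = t
--                         second = second_cnt
--         return [new_r, new_c]
--     else:
--         dr, dc = r[0], c[0]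
--         for j in range(len(r)):
--             nr = r[j]
--             nc = c[j]
--             second_cnt = second_condi(table, nr, nc, friend)
--             if second_cnt != 0 and second < second_cnt:
--                 dr = nr
--                 dc = nc
--                 second = second_cnt
--
--         return [dr, dc]
-- ===== SOURCE B (Python) =====
-- def counts(table, friend, j, t):
--     n = len(table)
--     fc = 0
--     sc = 0
--     for nx, ny in ((j, t - 1), (j, t + 1), (j + 1, t), (j - 1, t)):
--         if 0 <= nx < n and 0 <= ny < n:
--             v = table[nx][ny]
--             if v in friend:
--                 fc += 1
--             if v == -1:
--                 sc += 1
--     return fc, sc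
--
--
-- def bfs(table, i):
--     friend = i[1:]
--     n = len(table)
--     entries = []
--     for j in range(n):
--         for t in range(n):
--             if table[j][t] == -1:
--                 fc, sc = counts(table, friend, j, t)
--                 entries.append((j, t, fc, sc))
--     fcs = [fc for (_, _, fc, _) in entries if fc != 0]
--     maxf = max(fcs) if fcs else 0
--     cands = [(j, t, sc) for (j, t, fc, sc) in entries if fc != 0 and maxf == fc]
--     if len(cands) == 1:
--         return [cands[0][0], cands[0][1]]
--     if not cands:
--         pool = [(j, t, sc) for (j, t, _, sc) in entries]
--         best = (0, 0)
--     else: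
--         pool = cands
--         best = (cands[0][0], cands[0][1])
--     second = 0
--     for j, t, sc in pool:
--         if sc > second:
--             best = (j, t)
--             second = sc
--     return [best[0], best[1]]
-- ===== Notes on version B (the rewrite author's own statement) =====
-- stated objective: faster
-- what changed: B replaces A's four separate grid scans (each recomputing friend/empty adjacency counts per cell) with one scan that tabulates (row, col, friend_cnt, empty_cnt) per empty cell, after which the max, the candidate filter and the final strict-improvement selection are plain list operations over that table, with the two selection branches unified into one loop.
import Mathlib
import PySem

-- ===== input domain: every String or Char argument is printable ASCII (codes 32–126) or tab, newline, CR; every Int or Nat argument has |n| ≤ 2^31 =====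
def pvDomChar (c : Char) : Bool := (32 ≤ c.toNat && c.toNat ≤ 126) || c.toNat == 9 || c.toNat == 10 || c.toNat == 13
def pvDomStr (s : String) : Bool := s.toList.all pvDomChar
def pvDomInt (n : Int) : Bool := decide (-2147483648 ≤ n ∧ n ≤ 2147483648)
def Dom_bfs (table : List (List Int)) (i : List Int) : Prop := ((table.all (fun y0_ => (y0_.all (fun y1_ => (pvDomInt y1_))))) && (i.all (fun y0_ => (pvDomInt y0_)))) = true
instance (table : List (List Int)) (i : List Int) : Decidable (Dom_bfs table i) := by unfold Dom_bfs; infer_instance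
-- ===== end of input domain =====

-- One line: B tabulates each empty cell's (row, col, friend-adjacency, empty-adjacency) in a single grid scan
-- and then selects by plain list operations, instead of A's four grid scans recomputing the counts.


-- ===== PORT A =====
def second_condi (table : List (List Int)) (j t : Int) (friend : List Int) : Int :=
  let dx : List Int := [0, 0, 1, -1]
  let dy : List Int := [-1, 1, 0, 0]
  (PySem.List.pyRange 0 4).foldl (fun cnt k =>
    let nx := j + PySem.List.pyGetD dx k 0
    let ny := t + PySem.List.pyGetD dy k 0
    if nx < 0 ∨ ny < 0 ∨ (table.length : Int) ≤ nx ∨ (table.length : Int) ≤ ny then cnt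
    else if PySem.List.pyGetD (PySem.List.pyGetD table nx []) ny 0 = -1 then cnt + 1 else cnt) 0

def first_condi (table : List (List Int)) (j t : Int) (friend : List Int) : Int :=
  let dx : List Int := [0, 0, 1, -1]
  let dy : List Int := [-1, 1, 0, 0]
  (PySem.List.pyRange 0 4).foldl (fun cnt k =>
    let nx := j + PySem.List.pyGetD dx k 0
    let ny := t + PySem.List.pyGetD dy k 0
    if nx < 0 ∨ ny < 0 ∨ (table.length : Int) ≤ nx ∨ (table.length : Int) ≤ ny then cnt
    else if PySem.List.pyGetD (PySem.List.pyGetD table nx []) ny 0 ∈ friend then cnt + 1 else cnt) 0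

def bfs (table : List (List Int)) (i : List Int) : List Int :=
  let _start := PySem.List.pyGetD i 0 0      -- i[0]; Pre_bfs demands i ≠ []
  let friend := PySem.List.slice i (some 1) (some (i.length : Int))
  let n : Int := (table.length : Int)
  let first : Int :=
    (PySem.List.pyRange 0 n).foldl (fun first j =>
      (PySem.List.pyRange 0 n).foldl (fun first t =>
        if PySem.List.pyGetD (PySem.List.pyGetD table j []) t 0 = -1 then
          let first_cnt := first_condi table j t friend
          if first_cnt ≠ 0 ∧ first < first_cnt then first_cnt else first
        else first) first) 0
  let rc : List Int × List Int :=
    (PySem.List.pyRange 0 n).foldl (fun rc j =>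
      (PySem.List.pyRange 0 n).foldl (fun rc t =>
        if PySem.List.pyGetD (PySem.List.pyGetD table j []) t 0 = -1 then
          let first_cnt := first_condi table j t friend
          if first_cnt ≠ 0 ∧ first = first_cnt then (rc.1 ++ [j], rc.2 ++ [t]) else rc
        else rc) rc) (([] : List Int), ([] : List Int))
  let r := rc.1
  let c := rc.2
  if r.length = 1 ∧ c.length = 1 then
    [PySem.List.pyGetD r 0 0, PySem.List.pyGetD c 0 0]
  else if r = [] ∧ c = [] then
    let s :=
      (PySem.List.pyRange 0 n).foldl (fun s j =>
        (PySem.List.pyRange 0 n).foldl (fun s t =>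
          if PySem.List.pyGetD (PySem.List.pyGetD table j []) t 0 = -1 then
            let second_cnt := second_condi table j t friend
            if second_cnt ≠ 0 ∧ s.2.2 < second_cnt then (j, t, second_cnt) else s
          else s) s) (((0 : Int), (0 : Int), (0 : Int)))
    [s.1, s.2.1]
  else
    let d :=
      (PySem.List.pyRange 0 (r.length : Int)).foldl (fun s j =>
        let nr := PySem.List.pyGetD r j 0
        let nc := PySem.List.pyGetD c j 0
        let second_cnt := second_condi table nr nc friend
        if second_cnt ≠ 0 ∧ s.2.2 < second_cnt then (nr, nc, second_cnt) else s)
        (PySem.List.pyGetD r 0 0, PySem.List.pyGetD c 0 0, (0 : Int))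
    [d.1, d.2.1]

-- ===== PORT B =====
def counts (table : List (List Int)) (friend : List Int) (j t : Int) : Int × Int :=
  let n : Int := (table.length : Int)
  [(j, t - 1), (j, t + 1), (j + 1, t), (j - 1, t)].foldl (fun (s : Int × Int) p =>
    if 0 ≤ p.1 ∧ p.1 < n ∧ 0 ≤ p.2 ∧ p.2 < n then
      let v := PySem.List.pyGetD (PySem.List.pyGetD table p.1 []) p.2 0
      ((if v ∈ friend then s.1 + 1 else s.1), (if v = -1 then s.2 + 1 else s.2))
    else s) ((0 : Int), (0 : Int))

def bfs_alt (table : List (List Int)) (i : List Int) : List Int :=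
  let friend := PySem.List.slice i (some 1) none
  let n : Int := (table.length : Int)
  let entries : List (Int × Int × Int × Int) :=
    (PySem.List.pyRange 0 n).foldl (fun acc j =>
      (PySem.List.pyRange 0 n).foldl (fun acc t =>
        if PySem.List.pyGetD (PySem.List.pyGetD table j []) t 0 = -1 then
          let fs := counts table friend j t
          acc ++ [(j, t, fs.1, fs.2)]
        else acc) acc) []
  let fcs : List Int := (entries.filter (fun e => e.2.2.1 ≠ 0)).map (fun e => e.2.2.1)
  let maxf : Int := if fcs = [] then 0 else (PySem.List.max? fcs (fun y => y)).getD 0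
  let cands : List (Int × Int × Int) :=
    (entries.filter (fun e => e.2.2.1 ≠ 0 ∧ maxf = e.2.2.1)).map (fun e => (e.1, e.2.1, e.2.2.2))
  if cands.length = 1 then
    [(PySem.List.pyGetD cands 0 (0, 0, 0)).1, (PySem.List.pyGetD cands 0 (0, 0, 0)).2.1]
  else
    let pb : List (Int × Int × Int) × (Int × Int) :=
      if cands = [] then (entries.map (fun e => (e.1, e.2.1, e.2.2.2)), (0, 0))
      else (cands, ((PySem.List.pyGetD cands 0 (0, 0, 0)).1, (PySem.List.pyGetD cands 0 (0, 0, 0)).2.1))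
    let res := pb.1.foldl (fun (s : (Int × Int) × Int) e =>
      if e.2.2 > s.2 then ((e.1, e.2.1), e.2.2) else s) (pb.2, 0)
    [res.1.1, res.1.2]

-- ===== PRECONDITION & SPEC =====
-- Pre_bfs is exactly A's return domain: A raises IndexError on i = [] (start = i[0]) and whenever some row is
-- shorter than len(table) (the scans read table[j][t] for all t < len(table)).
def Pre_bfs (table : List (List Int)) (i : List Int) : Prop :=
  i ≠ [] ∧ ∀ row ∈ table, table.length ≤ row.length
instance (table : List (List Int)) (i : List Int) : Decidable (Pre_bfs table i) := by unfold Pre_bfs; infer_instance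
def pvWitness_bfs : List (List Int) × List Int := ([[-1, 2], [-1, -1]], [4, 2])

def Spec_bfs (table : List (List Int)) (i : List Int) (out : List Int) : Prop := out = bfs_alt table i
instance (table : List (List Int)) (i : List Int) (out : List Int) : Decidable (Spec_bfs table i out) := by unfold Spec_bfs; infer_instance

-- ===== CLAIM (what is proved, stated in full; the proofs are below) =====
def Claim_equal_bfs : Prop := ∀ (table : List (List Int)) (i : List Int), Dom_bfs table i → Pre_bfs table i → Spec_bfs table i (bfs table i)

-- ===== LEMMAS AND PROOFS =====
theorem gridFold {β σ : Type} (L M : List Int) (P : Int → Int → Prop) [inst : ∀ j t, Decidable (P j t)]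
    (h : Int → Int → β) (g : σ → β → σ) (init : σ) :
    L.foldl (fun a j => M.foldl (fun a t => if P j t then g a (h j t) else a) a) init
      = (L.flatMap (fun j => M.filterMap (fun t => if P j t then some (h j t) else none))).foldl g init := by
  rw [List.foldl_flatMap]
  apply PySem.List.foldl_congr_mem
  intro acc j hj
  rw [List.foldl_filterMap]
  apply PySem.List.foldl_congr_mem
  intro a t ht
  by_cases hP : P j t <;> simp [hP]

theorem friendsA_eq (i : List Int) : PySem.List.slice i (some 1) (some ((i.length : Nat) : Int)) = i.drop 1 := by
  rw [PySem.List.slice_toNat i (by omega) (by omega)]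
  simp [List.take_of_length_le]

theorem friendsB_eq (i : List Int) : PySem.List.slice i (some 1) none = i.drop 1 := by
  rw [PySem.List.slice_from i (by omega)]
  rfl

theorem countsAux (table : List (List Int)) (fr : List Int) (ps : List (Int × Int)) (s : Int × Int) :
    ps.foldl (fun (s : Int × Int) p =>
      if 0 ≤ p.1 ∧ p.1 < (table.length : Int) ∧ 0 ≤ p.2 ∧ p.2 < (table.length : Int) then
        let v := PySem.List.pyGetD (PySem.List.pyGetD table p.1 []) p.2 0
        ((if v ∈ fr then s.1 + 1 else s.1), (if v = -1 then s.2 + 1 else s.2))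
      else s) s
    = (ps.foldl (fun cnt p =>
        if p.1 < 0 ∨ p.2 < 0 ∨ (table.length : Int) ≤ p.1 ∨ (table.length : Int) ≤ p.2 then cnt
        else if PySem.List.pyGetD (PySem.List.pyGetD table p.1 []) p.2 0 ∈ fr then cnt + 1 else cnt) s.1,
       ps.foldl (fun cnt p =>
        if p.1 < 0 ∨ p.2 < 0 ∨ (table.length : Int) ≤ p.1 ∨ (table.length : Int) ≤ p.2 then cnt
        else if PySem.List.pyGetD (PySem.List.pyGetD table p.1 []) p.2 0 = -1 then cnt + 1 else cnt) s.2) := by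
  induction ps generalizing s with
  | nil => rfl
  | cons p rest ih =>
    simp only [List.foldl_cons]
    rw [ih]
    by_cases hg : 0 ≤ p.1 ∧ p.1 < (table.length : Int) ∧ 0 ≤ p.2 ∧ p.2 < (table.length : Int)
    · rw [if_pos hg,
        if_neg (show ¬ (p.1 < 0 ∨ p.2 < 0 ∨ (table.length : Int) ≤ p.1 ∨ (table.length : Int) ≤ p.2) by omega),
        if_neg (show ¬ (p.1 < 0 ∨ p.2 < 0 ∨ (table.length : Int) ≤ p.1 ∨ (table.length : Int) ≤ p.2) by omega)]
    · rw [if_neg hg,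
        if_pos (show (p.1 < 0 ∨ p.2 < 0 ∨ (table.length : Int) ≤ p.1 ∨ (table.length : Int) ≤ p.2) by omega),
        if_pos (show (p.1 < 0 ∨ p.2 < 0 ∨ (table.length : Int) ≤ p.1 ∨ (table.length : Int) ≤ p.2) by omega)]

theorem counts_eq (table : List (List Int)) (fr : List Int) (j t : Int) :
    counts table fr j t = (first_condi table j t fr, second_condi table j t fr) := by
  unfold counts first_condi second_condi
  rw [countsAux]
  rw [show PySem.List.pyRange 0 4 = [0, 1, 2, 3] by decide]
  simp only [List.foldl_cons, List.foldl_nil,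
    show PySem.List.pyGetD ([0, 0, 1, -1] : List Int) 0 0 = 0 by decide,
    show PySem.List.pyGetD ([0, 0, 1, -1] : List Int) 1 0 = 0 by decide,
    show PySem.List.pyGetD ([0, 0, 1, -1] : List Int) 2 0 = 1 by decide,
    show PySem.List.pyGetD ([0, 0, 1, -1] : List Int) 3 0 = -1 by decide,
    show PySem.List.pyGetD ([-1, 1, 0, 0] : List Int) 0 0 = -1 by decide,
    show PySem.List.pyGetD ([-1, 1, 0, 0] : List Int) 1 0 = 1 by decide,
    show PySem.List.pyGetD ([-1, 1, 0, 0] : List Int) 2 0 = 0 by decide,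
    show PySem.List.pyGetD ([-1, 1, 0, 0] : List Int) 3 0 = 0 by decide,
    add_zero, show ∀ x : Int, x + -1 = x - 1 from fun x => (sub_eq_add_neg x 1).symm]

def entTab (table : List (List Int)) (fr : List Int) : List (Int × Int × Int × Int) :=
  (PySem.List.pyRange 0 (table.length : Int)).flatMap (fun j =>
    (PySem.List.pyRange 0 (table.length : Int)).filterMap (fun t =>
      if PySem.List.pyGetD (PySem.List.pyGetD table j []) t 0 = -1 then
        some (j, t, first_condi table j t fr, second_condi table j t fr) else none))

theorem foldl_ge_init (l : List Int) (f : Int → Int → Int) (h : ∀ c x, c ≤ f c x) (a : Int) :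
    a ≤ l.foldl f a := by
  induction l generalizing a with
  | nil => exact le_refl a
  | cons x rest ih => exact le_trans (h a x) (ih (f a x))

theorem first_condi_nonneg (table : List (List Int)) (j t : Int) (fr : List Int) :
    0 ≤ first_condi table j t fr := by
  unfold first_condi
  apply foldl_ge_init
  intro c x
  dsimp only
  split_ifs <;> omega

theorem second_condi_nonneg (table : List (List Int)) (j t : Int) (fr : List Int) :
    0 ≤ second_condi table j t fr := by
  unfold second_condi
  apply foldl_ge_init
  intro c x
  dsimp only
  split_ifs <;> omega

theorem entTab_mem (table : List (List Int)) (fr : List Int) (e : Int × Int × Int × Int)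
    (he : e ∈ entTab table fr) :
    e.2.2.1 = first_condi table e.1 e.2.1 fr ∧ e.2.2.2 = second_condi table e.1 e.2.1 fr := by
  unfold entTab at he
  rw [List.mem_flatMap] at he
  obtain ⟨j, _, he⟩ := he
  rw [List.mem_filterMap] at he
  obtain ⟨t, _, he⟩ := he
  split at he
  · cases he
    exact ⟨rfl, rfl⟩
  · cases he

theorem maxFoldEq {α : Type} (f : α → Int) (l : List α) (h : ∀ e ∈ l, 0 ≤ f e) (a : Int) (ha : 0 ≤ a) :
    l.foldl (fun m e => if f e ≠ 0 ∧ m < f e then f e else m) a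
      = ((l.filter (fun e => decide (f e ≠ 0))).map f).foldl max a := by
  induction l generalizing a with
  | nil => rfl
  | cons e rest ih =>
    simp only [List.foldl_cons, List.filter_cons]
    by_cases hf : f e = 0
    · simp only [hf, ne_eq, not_true_eq_false, false_and, if_false, decide_false]
      exact ih (fun x hx => h x (List.mem_cons_of_mem _ hx)) a ha
    · have h1 : (if f e ≠ 0 ∧ a < f e then f e else a) = max a (f e) := by
        split_ifs <;> omega
      rw [h1]
      simp only [hf, decide_true, ne_eq, not_false_eq_true, if_true, List.map_cons, List.foldl_cons]
      exact ih (fun x hx => h x (List.mem_cons_of_mem _ hx)) (max a (f e)) (le_trans ha (le_max_left _ _))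

theorem maxList (L : List Int) (h : ∀ x ∈ L, 0 ≤ x) :
    L.foldl max 0 = (if L = [] then (0 : Int) else (PySem.List.max? L (fun y => y)).getD 0) := by
  cases L with
  | nil => rfl
  | cons x tL =>
    rw [if_neg (List.cons_ne_nil x tL), PySem.List.max?_id_cons]
    simp only [List.foldl_cons, Option.getD_some]
    have : max 0 x = x := by have := h x (List.mem_cons_self); omega
    rw [this]

theorem foldl_append_ite' {α β : Type} (P : α → Prop) [inst : DecidablePred P] (f : α → β)
    (l : List α) (acc : List β) :
    l.foldl (fun acc x => if P x then acc ++ [f x] else acc) acc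
      = acc ++ (l.filter (fun x => decide (P x))).map f := by
  induction l generalizing acc with
  | nil => simp
  | cons x rest ih =>
    simp only [List.foldl_cons, List.filter_cons]
    by_cases hx : P x
    · simp [hx, ih]
    · simp [hx, ih]

theorem selBridge {α : Type} (l : List α) (f1 f2 f3 : α → Int) (h : ∀ e ∈ l, 0 ≤ f3 e)
    (dr dc sec : Int) (hsec : 0 ≤ sec) :
    l.foldl (fun s e => if f3 e ≠ 0 ∧ s.2.2 < f3 e then (f1 e, f2 e, f3 e) else s) (dr, dc, sec)
      = (fun x : (Int × Int) × Int => (x.1.1, x.1.2, x.2))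
          (l.foldl (fun s e => if f3 e > s.2 then ((f1 e, f2 e), f3 e) else s) ((dr, dc), sec)) := by
  induction l generalizing dr dc sec with
  | nil => rfl
  | cons e rest ih =>
    simp only [List.foldl_cons]
    by_cases he : f3 e > sec
    · rw [if_pos (by have := h e List.mem_cons_self; omega), if_pos he]
      exact ih (fun x hx => h x (List.mem_cons_of_mem _ hx)) (f1 e) (f2 e) (f3 e)
        (h e List.mem_cons_self)
    · rw [if_neg (by omega), if_neg he]
      exact ih (fun x hx => h x (List.mem_cons_of_mem _ hx)) dr dc sec hsec

theorem pyGetD_map_fst4 (F : List (Int × Int × Int × Int)) (j : Int) :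
    PySem.List.pyGetD (F.map (fun e => e.1)) j 0
      = (PySem.List.pyGetD F j ((0 : Int), (0 : Int), (0 : Int), (0 : Int))).1 :=
  PySem.List.pyGetD_map (fun e => e.1) F j ((0 : Int), (0 : Int), (0 : Int), (0 : Int))

theorem pyGetD_map_snd4 (F : List (Int × Int × Int × Int)) (j : Int) :
    PySem.List.pyGetD (F.map (fun e => e.2.1)) j 0
      = (PySem.List.pyGetD F j ((0 : Int), (0 : Int), (0 : Int), (0 : Int))).2.1 :=
  PySem.List.pyGetD_map (fun e => e.2.1) F j ((0 : Int), (0 : Int), (0 : Int), (0 : Int))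

theorem entTab_nonneg (table : List (List Int)) (fr : List Int) (e : Int × Int × Int × Int)
    (he : e ∈ entTab table fr) : 0 ≤ e.2.2.1 ∧ 0 ≤ e.2.2.2 := by
  obtain ⟨h1, h2⟩ := entTab_mem table fr e he
  exact ⟨h1 ▸ first_condi_nonneg table e.1 e.2.1 fr, h2 ▸ second_condi_nonneg table e.1 e.2.1 fr⟩

theorem bfs_eq (table : List (List Int)) (i : List Int) : bfs table i = bfs_alt table i := by
  unfold bfs bfs_alt
  simp only [friendsA_eq, friendsB_eq]
  have hg1 : List.foldl (fun first j => List.foldl (fun first t =>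
        if PySem.List.pyGetD (PySem.List.pyGetD table j []) t 0 = -1 then
          if first_condi table j t (List.drop 1 i) ≠ 0 ∧ first < first_condi table j t (List.drop 1 i) then
            first_condi table j t (List.drop 1 i)
          else first
        else first) first (PySem.List.pyRange 0 (table.length : Int))) 0 (PySem.List.pyRange 0 (table.length : Int))
      = (entTab table (List.drop 1 i)).foldl (fun m e => if e.2.2.1 ≠ 0 ∧ m < e.2.2.1 then e.2.2.1 else m) 0 :=
    gridFold (PySem.List.pyRange 0 (table.length : Int)) (PySem.List.pyRange 0 (table.length : Int))
      (fun j t => PySem.List.pyGetD (PySem.List.pyGetD table j []) t 0 = -1)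
      (fun j t => (j, t, first_condi table j t (List.drop 1 i), second_condi table j t (List.drop 1 i)))
      (fun m e => if e.2.2.1 ≠ 0 ∧ m < e.2.2.1 then e.2.2.1 else m) 0
  rw [hg1]
  set fr := List.drop 1 i with hfr
  set E := entTab table fr with hE
  set m1 := E.foldl (fun m e => if e.2.2.1 ≠ 0 ∧ m < e.2.2.1 then e.2.2.1 else m) 0 with hm1
  have hg2 : List.foldl (fun rc j => List.foldl (fun rc t =>
        if PySem.List.pyGetD (PySem.List.pyGetD table j []) t 0 = -1 then
          if first_condi table j t fr ≠ 0 ∧ m1 = first_condi table j t fr then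
            (rc.1 ++ [j], rc.2 ++ [t]) else rc
        else rc) rc (PySem.List.pyRange 0 (table.length : Int)))
        (([] : List Int), ([] : List Int)) (PySem.List.pyRange 0 (table.length : Int))
      = E.foldl (fun rc e => if e.2.2.1 ≠ 0 ∧ m1 = e.2.2.1 then (rc.1 ++ [e.1], rc.2 ++ [e.2.1]) else rc) ([], []) :=
    gridFold (PySem.List.pyRange 0 (table.length : Int)) (PySem.List.pyRange 0 (table.length : Int))
      (fun j t => PySem.List.pyGetD (PySem.List.pyGetD table j []) t 0 = -1)
      (fun j t => (j, t, first_condi table j t fr, second_condi table j t fr))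
      (fun rc e => if e.2.2.1 ≠ 0 ∧ m1 = e.2.2.1 then (rc.1 ++ [e.1], rc.2 ++ [e.2.1]) else rc) ([], [])
  rw [hg2]
  have hg3 : E.foldl (fun rc e => if e.2.2.1 ≠ 0 ∧ m1 = e.2.2.1 then (rc.1 ++ [e.1], rc.2 ++ [e.2.1]) else rc) ([], [])
      = ((E.filter (fun e => decide (e.2.2.1 ≠ 0 ∧ m1 = e.2.2.1))).map (fun e => e.1),
         (E.filter (fun e => decide (e.2.2.1 ≠ 0 ∧ m1 = e.2.2.1))).map (fun e => e.2.1)) := by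
    rw [PySem.List.foldl_congr_mem E
      (fun rc e => if e.2.2.1 ≠ 0 ∧ m1 = e.2.2.1 then (rc.1 ++ [e.1], rc.2 ++ [e.2.1]) else rc)
      (fun rc e => (if e.2.2.1 ≠ 0 ∧ m1 = e.2.2.1 then rc.1 ++ [e.1] else rc.1,
                    if e.2.2.1 ≠ 0 ∧ m1 = e.2.2.1 then rc.2 ++ [e.2.1] else rc.2))
      ([], []) (by intro acc x hx; dsimp only; split_ifs <;> rfl)]
    rw [PySem.List.foldl_prod_mk
      (fun rc1 e => if e.2.2.1 ≠ 0 ∧ m1 = e.2.2.1 then rc1 ++ [e.1] else rc1)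
      (fun rc2 e => if e.2.2.1 ≠ 0 ∧ m1 = e.2.2.1 then rc2 ++ [e.2.1] else rc2) E [] []]
    rw [foldl_append_ite' (fun e => e.2.2.1 ≠ 0 ∧ m1 = e.2.2.1) (fun e => e.1) E [],
        foldl_append_ite' (fun e => e.2.2.1 ≠ 0 ∧ m1 = e.2.2.1) (fun e => e.2.1) E []]
    simp only [List.nil_append]
  rw [hg3]
  have hgB : List.foldl (fun acc j => List.foldl (fun acc t =>
        if PySem.List.pyGetD (PySem.List.pyGetD table j []) t 0 = -1 then
          acc ++ [(j, t, (counts table fr j t).1, (counts table fr j t).2)]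
        else acc) acc (PySem.List.pyRange 0 (table.length : Int)))
        ([] : List (Int × Int × Int × Int)) (PySem.List.pyRange 0 (table.length : Int)) = E := by
    refine Eq.trans (gridFold (PySem.List.pyRange 0 (table.length : Int)) (PySem.List.pyRange 0 (table.length : Int))
      (fun j t => PySem.List.pyGetD (PySem.List.pyGetD table j []) t 0 = -1)
      (fun j t => (j, t, (counts table fr j t).1, (counts table fr j t).2))
      (fun acc e => acc ++ [e]) []) ?_
    rw [PySem.List.foldl_append_singleton]
    simp only [counts_eq, List.nil_append]
    rfl
  rw [hgB]
  have hmax : m1 = (if ((E.filter (fun e => decide (e.2.2.1 ≠ 0))).map (fun e => e.2.2.1)) = [] then (0 : Int)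
      else (PySem.List.max? ((E.filter (fun e => decide (e.2.2.1 ≠ 0))).map (fun e => e.2.2.1)) (fun y => y)).getD 0) := by
    rw [hm1]
    rw [maxFoldEq (fun e => e.2.2.1) E (fun e he => (entTab_nonneg table fr e (hE ▸ he)).1) 0 le_rfl]
    exact maxList _ (fun x hx => by
      obtain ⟨e, he, rfl⟩ := List.mem_map.mp hx
      exact (entTab_nonneg table fr e (hE ▸ (List.mem_filter.mp he).1)).1)
  rw [← hmax]
  set F := E.filter (fun e => decide (e.2.2.1 ≠ 0 ∧ m1 = e.2.2.1)) with hF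
  have hFsub : ∀ e ∈ F, e ∈ E := by
    intro e he
    rw [hF] at he
    exact (List.mem_filter.mp he).1
  have hEnn : ∀ e ∈ E, 0 ≤ e.2.2.1 ∧ 0 ≤ e.2.2.2 := fun e he => entTab_nonneg table fr e (hE ▸ he)
  clear_value F
  rcases F with _ | ⟨e0, F1⟩
  · -- no candidate: A rescans the grid, B pools all entries
    rw [if_neg (by simp), if_pos ⟨rfl, rfl⟩, if_neg (by simp), if_pos (by simp)]
    have hg4 : List.foldl (fun s j => List.foldl (fun s t =>
          if PySem.List.pyGetD (PySem.List.pyGetD table j []) t 0 = -1 then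
            if second_condi table j t fr ≠ 0 ∧ s.2.2 < second_condi table j t fr then
              (j, t, second_condi table j t fr) else s
          else s) s (PySem.List.pyRange 0 (table.length : Int)))
          (((0 : Int), (0 : Int), (0 : Int))) (PySem.List.pyRange 0 (table.length : Int))
        = E.foldl (fun s e => if e.2.2.2 ≠ 0 ∧ s.2.2 < e.2.2.2 then (e.1, e.2.1, e.2.2.2) else s) (0, 0, 0) :=
      gridFold (PySem.List.pyRange 0 (table.length : Int)) (PySem.List.pyRange 0 (table.length : Int))
        (fun j t => PySem.List.pyGetD (PySem.List.pyGetD table j []) t 0 = -1)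
        (fun j t => (j, t, first_condi table j t fr, second_condi table j t fr))
        (fun s e => if e.2.2.2 ≠ 0 ∧ s.2.2 < e.2.2.2 then (e.1, e.2.1, e.2.2.2) else s) (0, 0, 0)
    rw [hg4]
    rw [selBridge E (fun e => e.1) (fun e => e.2.1) (fun e => e.2.2.2)
      (fun e he => (hEnn e he).2) 0 0 0 le_rfl]
    simp only [List.foldl_map]
  · rcases F1 with _ | ⟨e1, F2⟩
    · -- exactly one candidate
      rw [if_pos ⟨by simp, by simp⟩, if_pos (by simp)]
      simp [PySem.List.pyGetD_zero_cons]
    · -- two or more candidates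
      rw [if_neg (by simp), if_neg (by simp), if_neg (by simp)]
      simp only [pyGetD_map_fst4, pyGetD_map_snd4, List.length_map, PySem.List.pyGetD_zero_cons]
      rw [PySem.List.foldl_pyRange_zero_pyGetD' (e0 :: e1 :: F2) ((0 : Int), (0 : Int), (0 : Int), (0 : Int))
        (fun s x => if second_condi table x.1 x.2.1 fr ≠ 0 ∧ s.2.2 < second_condi table x.1 x.2.1 fr then
          (x.1, x.2.1, second_condi table x.1 x.2.1 fr) else s) (e0.1, e0.2.1, 0)]
      rw [PySem.List.foldl_congr_mem (e0 :: e1 :: F2)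
        (fun s x => if second_condi table x.1 x.2.1 fr ≠ 0 ∧ s.2.2 < second_condi table x.1 x.2.1 fr then
          (x.1, x.2.1, second_condi table x.1 x.2.1 fr) else s)
        (fun s x => if x.2.2.2 ≠ 0 ∧ s.2.2 < x.2.2.2 then (x.1, x.2.1, x.2.2.2) else s)
        (e0.1, e0.2.1, 0)
        (by
          intro acc x hx
          have hm := entTab_mem table fr x (hE ▸ hFsub x hx)
          dsimp only
          rw [← hm.2])]
      rw [selBridge (e0 :: e1 :: F2) (fun e => e.1) (fun e => e.2.1) (fun e => e.2.2.2)
        (fun e he => (hEnn e (hFsub e he)).2) e0.1 e0.2.1 0 le_rfl]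
      simp only [List.map_cons, PySem.List.pyGetD_zero_cons]
      rw [if_neg (by simp)]
      rw [show (e0.1, e0.2.1, e0.2.2.2) :: (e1.1, e1.2.1, e1.2.2.2) :: List.map (fun e => (e.1, e.2.1, e.2.2.2)) F2
        = List.map (fun e => (e.1, e.2.1, e.2.2.2)) (e0 :: e1 :: F2) from rfl]
      simp only [List.foldl_map]

-- ===== VERDICT (by name: the statement is the Claim_ definition above) =====
theorem bfs_spec : Claim_equal_bfs := by
  intro table i _ _
  show bfs table i = bfs_alt table i
  exact bfs_eq table i
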